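-- pv_equiv track=rewrite | github.com/sgt1796/POP-AGENT | agent/tools/file_read_tool.py | _sanitize_headers
-- ===== SOURCE A (Python) =====
-- from typing import Any, Dict, List, Optional, Sequence
--
-- def _sanitize_headers(header_row: Any) -> List[str]:
--     names: List[str] = []
--     counts: Dict[str, int] = {}
--     for index, raw in enumerate(tuple(header_row or ()), start=1):
--         base = str(raw).strip() if raw is not None else ""
--         if not base:
--             base = f"column_{index}"
--         seen = counts.get(base, 0)
--         counts[base] = seen + 1
--         names.append(base if seen == 0 else f"{base}_{seen + 1}")
--     return names
-- ===== SOURCE B (Python) =====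
-- from typing import Any, Dict, List
--
-- def _sanitize_headers(header_row: Any) -> List[str]:
--     # Phase 1: normalize every cell to its base name.
--     bases: List[str] = []
--     for index, raw in enumerate(tuple(header_row or ()), start=1):
--         base = str(raw).strip() if raw is not None else ""
--         bases.append(base or f"column_{index}")
--     # Phase 2: group positions by base name, then scatter-fill the output
--     # per group (the j-th occurrence of a base gets suffix _{j+1}).
--     groups: Dict[str, List[int]] = {}
--     for pos, base in enumerate(bases):
--         groups.setdefault(base, []).append(pos)
--     out = [""] * len(bases)
--     for base, positions in groups.items():
--         for j, pos in enumerate(positions):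
--             out[pos] = base if j == 0 else f"{base}_{j + 1}"
--     return out
-- ===== Notes on version B (the rewrite author's own statement) =====
-- stated objective: alternative
-- what changed: B replaces A's single left-to-right pass with a running occurrence counter by a group-and-scatter algorithm: it builds an index table mapping each base name to the list of its positions, then fills a preallocated output array group by group (out of original order), naming the j-th position of each group.
import Mathlib
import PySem

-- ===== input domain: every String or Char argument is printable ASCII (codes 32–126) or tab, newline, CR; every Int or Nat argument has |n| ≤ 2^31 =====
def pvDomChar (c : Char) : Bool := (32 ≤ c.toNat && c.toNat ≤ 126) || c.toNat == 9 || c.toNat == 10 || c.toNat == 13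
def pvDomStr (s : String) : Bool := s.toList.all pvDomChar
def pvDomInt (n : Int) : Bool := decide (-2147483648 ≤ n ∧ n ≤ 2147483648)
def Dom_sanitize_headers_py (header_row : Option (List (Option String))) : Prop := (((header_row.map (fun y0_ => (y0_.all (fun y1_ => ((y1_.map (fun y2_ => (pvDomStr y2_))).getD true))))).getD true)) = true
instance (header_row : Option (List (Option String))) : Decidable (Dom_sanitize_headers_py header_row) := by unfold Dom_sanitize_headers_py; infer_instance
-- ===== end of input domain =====

-- B replaces A's single pass with a running counter by group-and-scatter: it builds an index
-- table base ↦ list of positions, then fills a preallocated output per group, out of original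
-- order; objective: alternative algorithm, same observable result.

-- shared sub-expressions of both Pythons:
-- normalization of one (index, raw) pair: `str(raw).strip() if raw is not None else ""`,
-- replaced by f"column_{index}" when empty
def pvNorm (p : Int × Option String) : String :=
  let base := match p.2 with | some s => PySem.Str.strip s | none => ""
  if base = "" then "column_" ++ PySem.Int.toStr p.1 else base

-- the naming rule `base if k == 0 else f"{base}_{k + 1}"` (k = occurrences before this one)
def pvRename (b : String) (k : Int) : String :=
  if k = 0 then b else b ++ "_" ++ PySem.Int.toStr (k + 1)

-- ===== PORT A =====
-- A's loop body after `base` is computed: counter lookup, update, append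
def pvStepA (st : List String × PySem.Dict String Int) (base : String) :
    List String × PySem.Dict String Int :=
  let seen := st.2.getD base 0
  (st.1 ++ [pvRename base seen], st.2.insert base (seen + 1))

def sanitize_headers_py (header_row : Option (List (Option String))) : List String :=
  let xs := header_row.getD []   -- `tuple(header_row or ())`
  ((PySem.List.enumerate xs 1).foldl (fun st p => pvStepA st (pvNorm p))
    ([], PySem.Dict.empty)).1

-- ===== PORT B =====
def sanitize_headers_py_alt (header_row : Option (List (Option String))) : List String :=
  let xs := header_row.getD []   -- `tuple(header_row or ())`
  let bases := (PySem.List.enumerate xs 1).map pvNorm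
  -- `groups.setdefault(base, []).append(pos)` = modify with default []
  let groups := (PySem.List.enumerate bases 0).foldl
    (fun d p => d.modify p.2 [] (· ++ [p.1])) PySem.Dict.empty
  -- `out = [""] * len(bases)`, then the per-group scatter `out[pos] = …`; every position in
  -- the table is a valid nonnegative index, so `List.set pos.toNat` is exactly `out[pos] = …`
  let out0 := List.replicate bases.length ""
  groups.items.foldl (fun o kv =>
    (PySem.List.enumerate kv.2 0).foldl
      (fun o q => o.set q.2.toNat (pvRename kv.1 q.1)) o) out0

-- ===== PRECONDITION & SPEC =====
def Spec_sanitize_headers_py (header_row : Option (List (Option String))) (out : List String) : Prop := out = sanitize_headers_py_alt header_row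
instance (header_row : Option (List (Option String))) (out : List String) : Decidable (Spec_sanitize_headers_py header_row out) := by unfold Spec_sanitize_headers_py; infer_instance

-- ===== CLAIM (what is proved, stated in full; the proofs are below) =====
def Claim_equal_sanitize_headers_py : Prop := ∀ (header_row : Option (List (Option String))), Dom_sanitize_headers_py header_row → Spec_sanitize_headers_py header_row (sanitize_headers_py header_row)

-- ===== LEMMAS AND PROOFS =====

-- canonical assignment: name each base from its occurrence count in the processed prefix `done`
def pvAssign : List String → List String → List String
  | _, [] => []
  | done, b :: bs => pvRename b (done.count b) :: pvAssign (done ++ [b]) bs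

def pvCounter (done : List String) : PySem.Dict String Int :=
  done.foldl (fun d b => d.insert b (d.getD b 0 + 1)) PySem.Dict.empty

theorem pvCounter_getD (done : List String) (b : String) :
    (pvCounter done).getD b 0 = (done.count b : Int) := by
  unfold pvCounter
  rw [PySem.Dict.getD_foldl_insert_add_one]
  simp [PySem.Dict.getD, PySem.Dict.get?, PySem.Dict.empty]

theorem pvCounter_append_singleton (done : List String) (b : String) :
    pvCounter (done ++ [b]) =
      (pvCounter done).insert b ((pvCounter done).getD b 0 + 1) := by
  simp [pvCounter, List.foldl_append]

theorem foldA_eq (bs done names0 : List String) :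
    bs.foldl pvStepA (names0, pvCounter done)
      = (names0 ++ pvAssign done bs, pvCounter (done ++ bs)) := by
  induction bs generalizing done names0 with
  | nil => simp [pvAssign]
  | cons b bs ih =>
    have h1 : pvStepA (names0, pvCounter done) b
        = (names0 ++ [pvRename b (done.count b)], pvCounter (done ++ [b])) := by
      simp [pvStepA, pvCounter_getD, pvCounter_append_singleton]
    simp only [List.foldl_cons, h1]
    rw [ih (done ++ [b])]
    simp [pvAssign]

theorem pvAssign_length (bs done : List String) : (pvAssign done bs).length = bs.length := by
  induction bs generalizing done with
  | nil => simp [pvAssign]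
  | cons b bs ih => simp [pvAssign, ih]

theorem pvAssign_getElem? (bs done : List String) (i : Nat) (hi : i < bs.length) :
    (pvAssign done bs)[i]? = some (pvRename bs[i] ((done ++ bs.take i).count bs[i])) := by
  induction bs generalizing done i with
  | nil => simp at hi
  | cons b bs ih =>
    cases i with
    | zero => simp [pvAssign]
    | succ i =>
      have hi' : i < bs.length := by simpa using hi
      simp only [pvAssign, List.getElem?_cons_succ, List.take_succ_cons, List.getElem_cons_succ]
      rw [ih (done ++ [b]) i hi']
      simp

-- positions of base b in bases (0-based, as Ints), in increasing order
def pvPosOf (bases : List String) (b : String) : List Int :=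
  (((PySem.List.enumerate bases 0).filter (fun p => p.2 == b)).map (·.1))

theorem pvPosOf_append_singleton (bs : List String) (x b : String) :
    pvPosOf (bs ++ [x]) b = pvPosOf bs b ++ (if x == b then [(bs.length : Int)] else []) := by
  unfold pvPosOf
  rw [PySem.List.enumerate_append]
  simp only [PySem.List.enumerate_cons, PySem.List.enumerate_nil, List.filter_append, List.map_append]
  congr 1
  by_cases hxb : x = b <;> simp [hxb]

theorem pvPosOf_length (bs : List String) (b : String) :
    (pvPosOf bs b).length = bs.count b := by
  unfold pvPosOf
  rw [List.length_map, ← List.countP_eq_length_filter]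
  have h2 : bs.countP (· == b) = ((PySem.List.enumerate bs 0).map (·.2)).countP (· == b) := by
    rw [PySem.List.map_snd_enumerate]
  rw [List.count_eq_countP, h2, List.countP_map]
  rfl

-- the j-th recorded position of base b is the index of its (j+1)-st occurrence
theorem pvPosOf_getElem? (bases : List String) (b : String) (j : Nat) (q : Int)
    (h : (pvPosOf bases b)[j]? = some q) :
    ∃ (k : Nat), ∃ (hk : k < bases.length),
      q = (k : Int) ∧ bases[k] = b ∧ (bases.take k).count b = j := by
  induction bases using List.reverseRecOn generalizing j with
  | nil => simp [pvPosOf, PySem.List.enumerate_nil] at h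
  | append_singleton bs x ih =>
    rw [pvPosOf_append_singleton] at h
    by_cases hj : j < (pvPosOf bs b).length
    · rw [List.getElem?_append, if_pos hj] at h
      obtain ⟨k, hk, h1, h2, h3⟩ := ih j h
      refine ⟨k, by simp [Nat.lt_succ_of_lt hk], h1, ?_, ?_⟩
      · rw [List.getElem_append_left hk]; exact h2
      · rw [List.take_append_of_le_length (Nat.le_of_lt hk)]; exact h3
    · rw [List.getElem?_append, if_neg hj] at h
      split at h
      · next hxb =>
        rw [List.getElem?_eq_some_iff] at h
        obtain ⟨hlen, hval⟩ := h
        simp at hlen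
        have hj' : j = (pvPosOf bs b).length := by omega
        refine ⟨bs.length, by simp, ?_, ?_, ?_⟩
        · simp at hval; omega
        · simp only [List.getElem_append_right (le_refl bs.length)]
          simpa using hxb
        · rw [List.take_append_of_le_length (le_refl bs.length)]
          simp [hj', pvPosOf_length]
      · simp at h

theorem pvPosOf_mem (bases : List String) (i : Nat) (hi : i < bases.length) :
    (i : Int) ∈ pvPosOf bases bases[i] := by
  unfold pvPosOf
  refine List.mem_map.mpr ⟨((i : Int), bases[i]), List.mem_filter.mpr ⟨?_, by simp⟩, rfl⟩
  exact (PySem.List.mem_enumerate_iff _ _ _).mpr ⟨i, hi, by simp⟩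

theorem pvPosOf_map_toNat_nodup (bases : List String) (b : String) :
    ((pvPosOf bases b).map Int.toNat).Nodup := by
  have hp : (pvPosOf bases b).Pairwise (· < ·) := by
    unfold pvPosOf
    rw [List.pairwise_map]
    exact ((PySem.List.pairwise_lt_enumerate bases 0).sublist (List.filter_sublist))
  have hnn : ∀ q ∈ pvPosOf bases b, 0 ≤ q := by
    intro q hq
    unfold pvPosOf at hq
    obtain ⟨p, hp', rfl⟩ := List.mem_map.mp hq
    obtain ⟨k, hk, rfl⟩ := (PySem.List.mem_enumerate_iff _ _ _).mp (List.mem_of_mem_filter hp')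
    simp
  rw [List.Nodup, List.pairwise_map]
  refine hp.imp_of_mem ?_
  intro a c ha hc h heq
  have := hnn a ha
  omega

-- generic scatter: a fold of `set`s at distinct in-range positions
theorem pv_scatter_getElem? (L : List (Nat × String)) (out : List String) (i : Nat)
    (hnd : (L.map (·.1)).Nodup) (hlt : ∀ q ∈ L, q.1 < out.length) :
    (L.foldl (fun o q => o.set q.1 q.2) out)[i]?
      = ((L.find? (fun q => q.1 == i)).map (·.2)).or out[i]? := by
  induction L generalizing out with
  | nil => simp
  | cons q L ih =>
    simp only [List.map_cons, List.nodup_cons] at hnd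
    have hq : q.1 < out.length := hlt q (by simp)
    have hlt' : ∀ p ∈ L, p.1 < (out.set q.1 q.2).length := by
      intro p hp; simpa using hlt p (by simp [hp])
    rw [List.foldl_cons, ih _ hnd.2 hlt']
    by_cases hqi : q.1 = i
    · subst hqi
      have hfind : L.find? (fun p => p.1 == q.1) = none := by
        rw [List.find?_eq_none]
        intro p hp hpq
        exact hnd.1 ((by simpa using hpq : p.1 = q.1) ▸ List.mem_map_of_mem hp)
      simp [hfind, List.getElem?_set_self hq]
    · have hb : (q.1 == i) = false := by simpa using hqi
      simp [hb, List.getElem?_set_ne hqi]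

-- membership characterization of the scatter list of one group
theorem pvL_mem (bases : List String) (b : String) (y : Nat × String)
    (hy : y ∈ (PySem.List.enumerate (pvPosOf bases b) 0).map
        (fun q => (q.2.toNat, pvRename b q.1))) :
    ∃ (m : Nat), ∃ (hm : m < bases.length), y.1 = m ∧ bases[m] = b ∧
      y.2 = pvRename b ((bases.take m).count b) := by
  obtain ⟨p, hp, rfl⟩ := List.mem_map.mp hy
  obtain ⟨k, hk, rfl⟩ := (PySem.List.mem_enumerate_iff _ _ _).mp hp
  have hPk : (pvPosOf bases b)[k]? = some (pvPosOf bases b)[k] := List.getElem?_eq_getElem hk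
  obtain ⟨m, hm, h1, h2, h3⟩ := pvPosOf_getElem? bases b k _ hPk
  exact ⟨m, hm, by simp [h1], h2, by simp [h3]⟩

-- one group's fill, pointwise: it renames exactly the positions of its base
theorem pv_fill_getElem? (bases : List String) (b : String) (out : List String)
    (hlen : out.length = bases.length) (i : Nat) (hi : i < bases.length) :
    ((PySem.List.enumerate (pvPosOf bases b) 0).foldl
        (fun o q => o.set q.2.toNat (pvRename b q.1)) out)[i]?
      = if bases[i] = b then some (pvRename b ((bases.take i).count b)) else out[i]? := by
  have hfold : (PySem.List.enumerate (pvPosOf bases b) 0).foldl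
        (fun o q => o.set q.2.toNat (pvRename b q.1)) out
      = ((PySem.List.enumerate (pvPosOf bases b) 0).map
          (fun q => (q.2.toNat, pvRename b q.1))).foldl (fun o q => o.set q.1 q.2) out := by
    rw [List.foldl_map]
  set L := (PySem.List.enumerate (pvPosOf bases b) 0).map
      (fun q => (q.2.toNat, pvRename b q.1)) with hL
  have hnd : (L.map (·.1)).Nodup := by
    have hmap : L.map (·.1) = (pvPosOf bases b).map Int.toNat := by
      rw [hL, List.map_map]
      have h2 : ((PySem.List.enumerate (pvPosOf bases b) 0).map (·.2)).map Int.toNat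
          = (pvPosOf bases b).map Int.toNat := by
        rw [PySem.List.map_snd_enumerate]
      rw [← h2, List.map_map]
      rfl
    rw [hmap]; exact pvPosOf_map_toNat_nodup bases b
  have hlt : ∀ q ∈ L, q.1 < out.length := by
    intro q hq
    obtain ⟨m, hm, h1, _, _⟩ := pvL_mem bases b q hq
    omega
  rw [hfold, pv_scatter_getElem? L out i hnd hlt]
  by_cases hib : bases[i] = b
  · have hmem : (i : Int) ∈ pvPosOf bases b := hib ▸ pvPosOf_mem bases i hi
    obtain ⟨j, hj, hPj⟩ := List.getElem_of_mem hmem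
    have hxL : ((i : Nat), pvRename b ((0 : Int) + (j : Int))) ∈ L := by
      rw [hL]
      refine List.mem_map.mpr ⟨((0 : Int) + (j : Int), (i : Int)), ?_, by simp⟩
      exact (PySem.List.mem_enumerate_iff _ _ _).mpr ⟨j, hj, by simp [hPj]⟩
    have hsome : (L.find? (fun q => q.1 == i)).isSome := by
      rw [List.find?_isSome]
      exact ⟨_, hxL, by simp⟩
    obtain ⟨y, hy⟩ := Option.isSome_iff_exists.mp hsome
    have hyi : y.1 = i := by simpa using List.find?_some hy
    obtain ⟨m, hm, h1, h2, h3⟩ := pvL_mem bases b y (List.mem_of_find?_eq_some hy)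
    have hmi : m = i := by omega
    rw [hy, if_pos hib]
    simp [h3, hmi]
  · have hnone : L.find? (fun q => q.1 == i) = none := by
      rw [List.find?_eq_none]
      intro x hx hxi
      obtain ⟨m, hm, h1, h2, _⟩ := pvL_mem bases b x hx
      have : m = i := by simp at hxi; omega
      exact hib (this ▸ h2)
    rw [hnone, if_neg hib]
    simp

theorem pv_fill_length (P : List Int) (b : String) (out : List String) :
    ((PySem.List.enumerate P 0).foldl
        (fun o q => o.set q.2.toNat (pvRename b q.1)) out).length = out.length := by
  generalize PySem.List.enumerate P 0 = l
  induction l generalizing out with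
  | nil => rfl
  | cons q l ih => simp [ih, List.length_set]

-- the outer fold over the groups, pointwise
theorem pv_outer (bases : List String) (ks : List String) (out : List String)
    (hlen : out.length = bases.length) (i : Nat) (hi : i < bases.length) :
    (ks.foldl (fun o b => (PySem.List.enumerate (pvPosOf bases b) 0).foldl
        (fun o q => o.set q.2.toNat (pvRename b q.1)) o) out)[i]?
      = if bases[i] ∈ ks then some (pvRename bases[i] ((bases.take i).count bases[i]))
        else out[i]? := by
  induction ks generalizing out with
  | nil => simp
  | cons k ks ih =>
    rw [List.foldl_cons]
    have hlen' : ((PySem.List.enumerate (pvPosOf bases k) 0).foldl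
        (fun o q => o.set q.2.toNat (pvRename k q.1)) out).length = bases.length := by
      rw [pv_fill_length]; exact hlen
    rw [ih _ hlen']
    by_cases hmem : bases[i] ∈ ks
    · simp [hmem]
    · rw [if_neg hmem, pv_fill_getElem? bases k out hlen i hi]
      by_cases hik : bases[i] = k
      · simp [hik]
      · have hno : bases[i] ∉ (k :: ks) := by simp [hik, hmem]
        simp [hik, hno]

theorem pv_outer_length (bases : List String) (ks : List String) (out : List String) :
    (ks.foldl (fun o b => (PySem.List.enumerate (pvPosOf bases b) 0).foldl
        (fun o q => o.set q.2.toNat (pvRename b q.1)) o) out).length = out.length := by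
  induction ks generalizing out with
  | nil => rfl
  | cons k ks ih => rw [List.foldl_cons, ih, pv_fill_length]

theorem pv_groups_getD (bases : List String) (c : String) :
    ((PySem.List.enumerate bases 0).foldl
        (fun d p => d.modify p.2 [] (· ++ [p.1])) PySem.Dict.empty).getD c []
      = pvPosOf bases c := by
  have h1 : (PySem.List.enumerate bases 0).foldl
        (fun d p => d.modify p.2 [] (· ++ [p.1])) PySem.Dict.empty
      = ((PySem.List.enumerate bases 0).map (fun p => (p.2, p.1))).foldl
        (fun d p => d.modify p.1 [] (· ++ [p.2])) PySem.Dict.empty := by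
    rw [List.foldl_map]
  rw [h1, PySem.Dict.getD_foldl_modify_append]
  rw [List.filter_map]
  simp only [List.map_map]
  unfold pvPosOf
  simp [PySem.Dict.getD_empty]
  rfl

theorem pv_groups_keys (bases : List String) :
    ((PySem.List.enumerate bases 0).foldl
        (fun d p => d.modify p.2 [] (· ++ [p.1])) PySem.Dict.empty).keys
      = PySem.Set.ofList bases := by
  have h := PySem.Dict.keys_foldl_modify_key (PySem.List.enumerate bases 0)
      (fun p => p.2) [] (fun _ p old => old ++ [p.1]) (PySem.Dict.empty)
  simp only at h
  rw [h, PySem.Dict.keys_empty, PySem.List.map_snd_enumerate]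
  rfl

theorem pv_groups_items (bases : List String) :
    ((PySem.List.enumerate bases 0).foldl
        (fun d p => d.modify p.2 [] (· ++ [p.1])) PySem.Dict.empty).items
      = (PySem.Set.ofList bases).map (fun b => (b, pvPosOf bases b)) := by
  have hnd : ((PySem.List.enumerate bases 0).foldl
        (fun d p => d.modify p.2 [] (· ++ [p.1])) PySem.Dict.empty).keys.Nodup := by
    have h := PySem.Dict.nodup_keys_foldl_modify_key (PySem.List.enumerate bases 0)
        (fun p => p.2) [] (fun _ p old => old ++ [p.1]) (PySem.Dict.empty)
        PySem.Dict.nodup_keys_empty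
    simpa using h
  rw [PySem.Dict.items_eq_map_keys _ hnd [], pv_groups_keys]
  exact List.map_congr_left (fun k _ => by rw [pv_groups_getD])

-- ===== VERDICT (by name: the statement is the Claim_ definition above) =====
theorem sanitize_headers_py_spec : Claim_equal_sanitize_headers_py := by
  intro header_row _
  unfold Spec_sanitize_headers_py sanitize_headers_py sanitize_headers_py_alt
  dsimp only
  set xs := header_row.getD [] with hxs
  set bases := (PySem.List.enumerate xs 1).map pvNorm with hbases
  -- A's loop computes the canonical assignment
  have hA : ((PySem.List.enumerate xs 1).foldl (fun st p => pvStepA st (pvNorm p))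
      ([], PySem.Dict.empty)).1 = pvAssign [] bases := by
    rw [← List.foldl_map]
    have he : (PySem.Dict.empty : PySem.Dict String Int) = pvCounter [] := rfl
    rw [← hbases, he, foldA_eq]
    simp
  rw [hA]
  -- B's groups-items fold, rewritten as a fold over the distinct bases
  rw [pv_groups_items bases, List.foldl_map]
  apply List.ext_getElem?
  intro i
  by_cases hi : i < bases.length
  · rw [pvAssign_getElem? bases [] i hi,
      pv_outer bases (PySem.Set.ofList bases) (List.replicate bases.length "")
        (by simp) i hi,
      if_pos ((PySem.Set.mem_ofList bases bases[i]).mpr (bases.getElem_mem hi))]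
    simp
  · rw [List.getElem?_eq_none (by rw [pvAssign_length]; omega),
      List.getElem?_eq_none (by rw [pv_outer_length]; simp; omega)]
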